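-- pv_equiv track=rewrite | github.com/insarlab/MintPy | src/mintpy/utils/readfile.py | standardize_metadata
-- ===== SOURCE A (Python) =====
-- STD_METADATA_KEYS = {
--     # ROI_PAC/MintPy attributes
--     'ALOOKS'             : ['azimuth_looks'],
--     'RLOOKS'             : ['range_looks'],
--     'AZIMUTH_PIXEL_SIZE' : ['azimuthPixelSize', 'azimuth_pixel_spacing', 'az_pixel_spacing', 'azimuth_spacing'],
--     'RANGE_PIXEL_SIZE'   : ['rangePixelSize', 'range_pixel_spacing', 'rg_pixel_spacing', 'range_spacing'],
--     'CENTER_LINE_UTC'    : ['center_time'],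
--     'DATA_TYPE'          : ['dataType', 'data_type', 'image_format'],
--     'EARTH_RADIUS'       : ['earthRadius', 'earth_radius_below_sensor', 'earth_radius'],
--     'HEADING'            : ['HEADING_DEG', 'heading', 'centre_heading'],
--     'HEIGHT'             : ['altitude', 'SC_height'],
--     'BANDS'              : ['number_bands', 'bands'],
--     'INTERLEAVE'         : ['scheme', 'interleave'],
--     'LENGTH'             : ['length', 'FILE_LENGTH', 'lines', 'azimuth_lines', 'nlines', 'az_samp',
--                             'interferogram_azimuth_lines', 'num_output_lines'],
--     'LAT_REF1'           : ['first_near_lat'],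
--     'LON_REF1'           : ['first_near_long'],
--     'LAT_REF2'           : ['first_far_lat'],
--     'LON_REF2'           : ['first_far_long'],
--     'LAT_REF3'           : ['last_near_lat'],
--     'LON_REF3'           : ['last_near_long'],
--     'LAT_REF4'           : ['last_far_lat'],
--     'LON_REF4'           : ['last_far_long'],
--     'ORBIT_DIRECTION'    : ['passDirection', 'pass'],
--     'NO_DATA_VALUE'      : ['NoDataValue'],
--     'PLATFORM'           : ['spacecraftName', 'sensor', 'mission'],
--     'POLARIZATION'       : ['polarization'],
--     'PRF'                : ['prf', 'pulse_repetition_frequency'],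
--     'STARTING_RANGE'     : ['startingRange', 'near_range_slc', 'near_range', 'slant_range_to_first_pixel'],
--     'WAVELENGTH'         : ['wavelength', 'Wavelength', 'radarWavelength', 'radar_wavelength'],
--     'WIDTH'              : ['width', 'Width', 'samples', 'range_samp', 'interferogram_width', 'num_samples_per_line'],
--     # from PySAR [MintPy<=1.1.1]
--     'REF_DATE'           : ['ref_date'],
--     'REF_LAT'            : ['ref_lat'],
--     'REF_LON'            : ['ref_lon'],
--     'REF_X'              : ['ref_x'],
--     'REF_Y'              : ['ref_y'],
--     'SUBSET_XMIN'        : ['subset_x0'],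
--     'SUBSET_XMAX'        : ['subset_x1'],
--     'SUBSET_YMIN'        : ['subset_y0'],
--     'SUBSET_YMAX'        : ['subset_y1'],
--     # from Gamma geo-coordinates - degree / meter
--     'X_FIRST'            : ['corner_lon', 'corner_east'],
--     'Y_FIRST'            : ['corner_lat', 'corner_north'],
--     'X_STEP'             : ['post_lon', 'post_east'],
--     'Y_STEP'             : ['post_lat', 'post_north'],
--
--     # HDF-EOS5 attributes
--     'beam_swath'     : ['swathNumber'],
--     'first_frame'    : ['firstFrameNumber'],
--     'last_frame'     : ['lastFrameNumber'],
--     'relative_orbit' : ['trackNumber'],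
-- }
--
-- def standardize_metadata(in_meta, standard_keys=STD_METADATA_KEYS):
--     """Convert metadata into ROI_PAC/MintPy format (for metadata with the same values)."""
--
--     # make a copy
--     out_meta = dict()
--     for key, value in iter(in_meta.items()):
--         out_meta[key] = value
--
--     # get potential keys to match
--     in_keys = [i for i in out_meta.keys() if i not in standard_keys.keys()]
--     std_keys = [i for i in standard_keys.keys() if i not in out_meta.keys()]
--
--     # loop to find match and assign values
--     for std_key in std_keys:
--         cand_keys = standard_keys[std_key]
--         cand_keys = [i for i in cand_keys if i in in_keys]
--         if len(cand_keys) > 0: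
--             out_meta[std_key] = out_meta[cand_keys[0]]
--
--     return out_meta
-- ===== SOURCE B (Python) =====
-- STD_METADATA_KEYS = {
--     'ALOOKS'             : ['azimuth_looks'],
--     'RLOOKS'             : ['range_looks'],
--     'AZIMUTH_PIXEL_SIZE' : ['azimuthPixelSize', 'azimuth_pixel_spacing', 'az_pixel_spacing', 'azimuth_spacing'],
--     'RANGE_PIXEL_SIZE'   : ['rangePixelSize', 'range_pixel_spacing', 'rg_pixel_spacing', 'range_spacing'],
--     'CENTER_LINE_UTC'    : ['center_time'],
--     'DATA_TYPE'          : ['dataType', 'data_type', 'image_format'],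
--     'EARTH_RADIUS'       : ['earthRadius', 'earth_radius_below_sensor', 'earth_radius'],
--     'HEADING'            : ['HEADING_DEG', 'heading', 'centre_heading'],
--     'HEIGHT'             : ['altitude', 'SC_height'],
--     'BANDS'              : ['number_bands', 'bands'],
--     'INTERLEAVE'         : ['scheme', 'interleave'],
--     'LENGTH'             : ['length', 'FILE_LENGTH', 'lines', 'azimuth_lines', 'nlines', 'az_samp',
--                             'interferogram_azimuth_lines', 'num_output_lines'],
--     'LAT_REF1'           : ['first_near_lat'],
--     'LON_REF1'           : ['first_near_long'],
--     'LAT_REF2'           : ['first_far_lat'],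
--     'LON_REF2'           : ['first_far_long'],
--     'LAT_REF3'           : ['last_near_lat'],
--     'LON_REF3'           : ['last_near_long'],
--     'LAT_REF4'           : ['last_far_lat'],
--     'LON_REF4'           : ['last_far_long'],
--     'ORBIT_DIRECTION'    : ['passDirection', 'pass'],
--     'NO_DATA_VALUE'      : ['NoDataValue'],
--     'PLATFORM'           : ['spacecraftName', 'sensor', 'mission'],
--     'POLARIZATION'       : ['polarization'],
--     'PRF'                : ['prf', 'pulse_repetition_frequency'],
--     'STARTING_RANGE'     : ['startingRange', 'near_range_slc', 'near_range', 'slant_range_to_first_pixel'],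
--     'WAVELENGTH'         : ['wavelength', 'Wavelength', 'radarWavelength', 'radar_wavelength'],
--     'WIDTH'              : ['width', 'Width', 'samples', 'range_samp', 'interferogram_width', 'num_samples_per_line'],
--     'REF_DATE'           : ['ref_date'],
--     'REF_LAT'            : ['ref_lat'],
--     'REF_LON'            : ['ref_lon'],
--     'REF_X'              : ['ref_x'],
--     'REF_Y'              : ['ref_y'],
--     'SUBSET_XMIN'        : ['subset_x0'],
--     'SUBSET_XMAX'        : ['subset_x1'],
--     'SUBSET_YMIN'        : ['subset_y0'],
--     'SUBSET_YMAX'        : ['subset_y1'],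
--     'X_FIRST'            : ['corner_lon', 'corner_east'],
--     'Y_FIRST'            : ['corner_lat', 'corner_north'],
--     'X_STEP'             : ['post_lon', 'post_east'],
--     'Y_STEP'             : ['post_lat', 'post_north'],
--     'beam_swath'     : ['swathNumber'],
--     'first_frame'    : ['firstFrameNumber'],
--     'last_frame'     : ['lastFrameNumber'],
--     'relative_orbit' : ['trackNumber'],
-- }
--
--
-- def standardize_metadata(in_meta, standard_keys=STD_METADATA_KEYS):
--     """Convert metadata into ROI_PAC/MintPy format (reverse-index, single pass over the input)."""
--     out_meta = dict(in_meta)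
--
--     # reverse index: alias -> [(standard_key, priority)] built once from standard_keys
--     rev = {}
--     for std_key, cands in standard_keys.items():
--         for idx, alias in enumerate(cands):
--             rev.setdefault(alias, []).append((std_key, idx))
--
--     # one pass over the input keys: keep, per missing standard key, the alias of lowest priority
--     best = {}
--     for key in out_meta:
--         if key in standard_keys:
--             continue
--         for std_key, idx in rev.get(key, []):
--             if std_key in out_meta:
--                 continue
--             cur = best.get(std_key)
--             if cur is None or idx < cur[1]:
--                 best[std_key] = (key, idx)
--
--     # emit matches in standard_keys order
--     for std_key in standard_keys:
--         if std_key in best: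
--             out_meta[std_key] = out_meta[best[std_key][0]]
--
--     return out_meta
-- ===== Notes on version B (the rewrite author's own statement) =====
-- stated objective: faster
-- what changed: Instead of filtering every standard key's candidate list against a rebuilt in_keys list, B builds a reverse index alias->(standard_key, priority) once and makes a single pass over the input keys, keeping the lowest-priority alias per missing standard key, then emits matches in standard_keys order.
import Mathlib
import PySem

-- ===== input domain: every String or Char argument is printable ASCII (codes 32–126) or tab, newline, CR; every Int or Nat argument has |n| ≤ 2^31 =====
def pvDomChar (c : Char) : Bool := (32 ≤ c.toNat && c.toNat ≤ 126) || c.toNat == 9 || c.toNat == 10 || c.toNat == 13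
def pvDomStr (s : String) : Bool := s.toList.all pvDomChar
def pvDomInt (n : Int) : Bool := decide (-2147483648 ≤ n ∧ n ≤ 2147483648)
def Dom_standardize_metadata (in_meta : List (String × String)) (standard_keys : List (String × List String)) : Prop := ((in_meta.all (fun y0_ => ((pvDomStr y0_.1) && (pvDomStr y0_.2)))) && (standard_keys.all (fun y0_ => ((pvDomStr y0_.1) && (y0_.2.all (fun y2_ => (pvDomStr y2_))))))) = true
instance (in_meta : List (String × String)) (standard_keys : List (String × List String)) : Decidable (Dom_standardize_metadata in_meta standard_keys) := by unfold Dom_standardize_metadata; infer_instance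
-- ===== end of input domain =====

-- B replaces A's per-standard-key scans over the input with a reverse alias index and one pass
-- over the input keys (objective: faster by a constant-factor mechanism on large inputs).
-- Both Python dicts are represented as PySem.Dict built from the association lists.

-- ===== PORT A =====
def standardize_metadata (in_meta : List (String × String)) (standard_keys : List (String × List String)) : List (String × String) :=
  -- standard_keys is a Python dict; the list denotes it
  let skd : PySem.Dict String (List String) := PySem.Dict.ofList standard_keys
  -- make a copy: for key, value in iter(in_meta.items()): out_meta[key] = value
  let out_meta : PySem.Dict String String :=
    List.foldl (fun (d : PySem.Dict String String) p => d.insert p.1 p.2) PySem.Dict.empty in_meta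
  -- in_keys = [i for i in out_meta.keys() if i not in standard_keys.keys()]
  let in_keys := out_meta.keys.filter (fun i => !(skd.contains i))
  -- std_keys = [i for i in standard_keys.keys() if i not in out_meta.keys()]
  let std_keys := skd.keys.filter (fun i => !(out_meta.contains i))
  -- loop to find match and assign values
  let out := List.foldl (fun (d : PySem.Dict String String) std_key =>
      -- standard_keys[std_key]: std_key is a key of skd, so getD's default is unreachable
      let cand_keys := (skd.getD std_key []).filter (fun c => in_keys.contains c)
      if cand_keys.length > 0 then
        -- out_meta[cand_keys[0]]: cand_keys[0] is a key of out_meta, defaults unreachable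
        d.insert std_key (d.getD (cand_keys.headD "") "")
      else d)
    out_meta std_keys
  out.items

-- ===== PORT B =====
def standardize_metadata_alt (in_meta : List (String × String)) (standard_keys : List (String × List String)) : List (String × String) :=
  -- out_meta = dict(in_meta)
  let out_meta : PySem.Dict String String := PySem.Dict.ofList in_meta
  let skd : PySem.Dict String (List String) := PySem.Dict.ofList standard_keys
  -- rev: alias -> [(standard_key, priority)]
  let rev : PySem.Dict String (List (String × Int)) :=
    List.foldl (fun (r : PySem.Dict String (List (String × Int))) p =>
        List.foldl (fun (r : PySem.Dict String (List (String × Int))) q =>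
            r.modify q.2 [] (fun l => l ++ [(p.1, q.1)]))
          r (PySem.List.enumerate p.2 0))
      PySem.Dict.empty skd.items
  -- one pass over the input keys: per missing standard key keep the lowest-priority alias
  let best : PySem.Dict String (String × Int) :=
    List.foldl (fun (b : PySem.Dict String (String × Int)) key =>
        if skd.contains key then b
        else
          List.foldl (fun (b : PySem.Dict String (String × Int)) q =>
              if out_meta.contains q.1 then b
              else
                match b.get? q.1 with
                | none => b.insert q.1 (key, q.2)
                | some cur => if q.2 < cur.2 then b.insert q.1 (key, q.2) else b)
            b (rev.getD key []))
      PySem.Dict.empty out_meta.keys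
  -- emit matches in standard_keys order
  let out := List.foldl (fun (d : PySem.Dict String String) std_key =>
      match best.get? std_key with
      | some p => d.insert std_key (d.getD p.1 "")
      | none => d)
    out_meta skd.keys
  out.items

-- ===== PRECONDITION & SPEC =====
def Spec_standardize_metadata (in_meta : List (String × String)) (standard_keys : List (String × List String)) (out : List (String × String)) : Prop := out = standardize_metadata_alt in_meta standard_keys
instance (in_meta : List (String × String)) (standard_keys : List (String × List String)) (out : List (String × String)) : Decidable (Spec_standardize_metadata in_meta standard_keys out) := by unfold Spec_standardize_metadata; infer_instance

-- ===== CLAIM (what is proved, stated in full; the proofs are below) =====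
def Claim_equal_standardize_metadata : Prop := ∀ (in_meta : List (String × String)) (standard_keys : List (String × List String)), Dom_standardize_metadata in_meta standard_keys → Spec_standardize_metadata in_meta standard_keys (standardize_metadata in_meta standard_keys)

-- ===== LEMMAS AND PROOFS =====

def pvMinStep (o : Option (String × Int)) (q : String × Int) : Option (String × Int) :=
  match o with
  | none => some q
  | some cur => if q.2 < cur.2 then some q else some cur

lemma pvMinStep_isSome (o : Option (String × Int)) (q : String × Int) : (pvMinStep o q).isSome := by
  cases o <;> simp [pvMinStep]; split <;> simp

lemma pvMinFold_none (l : List (String × Int)) (o : Option (String × Int)) :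
    l.foldl pvMinStep o = none ↔ o = none ∧ l = [] := by
  induction l generalizing o with
  | nil => simp
  | cons q t ih =>
    simp only [List.foldl_cons, ih]
    constructor
    · rintro ⟨h, -⟩; have := pvMinStep_isSome o q; rw [h] at this; simp at this
    · rintro ⟨-, h⟩; simp at h

lemma pvMinFold_mem (l : List (String × Int)) (o : Option (String × Int)) (m : String × Int)
    (h : l.foldl pvMinStep o = some m) : m ∈ l ∨ o = some m := by
  induction l generalizing o with
  | nil => right; exact h
  | cons q t ih =>
    rcases ih (pvMinStep o q) h with hm | hm
    · left; exact List.mem_cons_of_mem _ hm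
    · cases o with
      | none => left; simp [pvMinStep] at hm; simp [hm]
      | some cur =>
        simp only [pvMinStep] at hm
        split at hm
        · left; simp at hm; simp [hm]
        · right; exact hm

lemma pvMinFold_le_acc (l : List (String × Int)) (x m : String × Int)
    (h : l.foldl pvMinStep (some x) = some m) : m.2 ≤ x.2 := by
  induction l generalizing x with
  | nil => simp at h; simp [h]
  | cons q t ih =>
    simp only [List.foldl_cons, pvMinStep] at h
    split at h
    · next hc => exact le_trans (ih _ h) (le_of_lt hc)
    · next hc => exact ih _ h

lemma pvMinFold_le (l : List (String × Int)) (o : Option (String × Int)) (m : String × Int)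
    (h : l.foldl pvMinStep o = some m) : ∀ q ∈ l, m.2 ≤ q.2 := by
  induction l generalizing o with
  | nil => simp
  | cons q t ih =>
    intro r hr
    rcases List.mem_cons.1 hr with rfl | hr
    · have h2 : (pvMinStep o r).isSome := pvMinStep_isSome o r
      rcases Option.isSome_iff_exists.1 h2 with ⟨y, hy⟩
      rw [List.foldl_cons, hy] at h
      have h3 : y.2 ≤ r.2 := by
        cases o with
        | none => simp [pvMinStep] at hy; simp [hy]
        | some cur =>
          simp only [pvMinStep] at hy
          split at hy
          · simp at hy; simp [hy]
          · simp at hy; subst hy; omega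
      exact le_trans (pvMinFold_le_acc t y m h) h3
    · exact ih (pvMinStep o q) h r hr

def pvInKeys (M : PySem.Dict String String) (SK : PySem.Dict String (List String)) : List String :=
  M.keys.filter (fun i => !(SK.contains i))

def pvFlat (SK : PySem.Dict String (List String)) : List (String × String × Int) :=
  SK.items.flatMap (fun p => (PySem.List.enumerate p.2 0).map (fun q => (q.2, p.1, q.1)))

def pvRev (SK : PySem.Dict String (List String)) : PySem.Dict String (List (String × Int)) :=
  List.foldl (fun (r : PySem.Dict String (List (String × Int))) p =>
      List.foldl (fun (r : PySem.Dict String (List (String × Int))) q =>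
          r.modify q.2 [] (fun l => l ++ [(p.1, q.1)]))
        r (PySem.List.enumerate p.2 0))
    PySem.Dict.empty SK.items

def pvSeq (M : PySem.Dict String String) (SK : PySem.Dict String (List String)) (k : String) : List (String × Int) :=
  M.keys.flatMap (fun key =>
    if SK.contains key then []
    else ((pvRev SK).getD key []).filterMap (fun q => if q.1 = k then some (key, q.2) else none))

lemma mem_pvInKeys (M : PySem.Dict String String) (SK : PySem.Dict String (List String)) (c : String) :
    (pvInKeys M SK).contains c = true ↔ c ∈ M.keys ∧ SK.contains c = false := by
  simp [pvInKeys, List.mem_filter]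

lemma mem_enumerate {α : Type} (xs : List α) (s i : Int) (x : α) :
    (i, x) ∈ PySem.List.enumerate xs s ↔ ∃ j : Nat, xs[j]? = some x ∧ i = s + j := by
  induction xs generalizing s with
  | nil => simp [PySem.List.enumerate_nil]
  | cons y t ih =>
    rw [PySem.List.enumerate_cons]
    simp only [List.mem_cons, ih]
    constructor
    · rintro (h | ⟨j, hj, rfl⟩)
      · exact ⟨0, by simp at h; simp [h.2, h.1]⟩
      · exact ⟨j + 1, by simpa using hj, by push_cast; ring⟩
    · rintro ⟨j, hj, rfl⟩
      cases j with
      | zero => left; simp at hj; simp [hj]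
      | succ j => right; exact ⟨j, by simpa using hj, by push_cast; ring⟩

lemma pvRev_eq_foldl (SK : PySem.Dict String (List String)) :
    pvRev SK = (pvFlat SK).foldl (fun d t => d.modify t.1 [] (fun l => l ++ [t.2])) PySem.Dict.empty := by
  rw [pvFlat, List.foldl_flatMap]
  unfold pvRev
  congr 1
  funext r p
  rw [List.foldl_map]

lemma pvRev_getD (SK : PySem.Dict String (List String)) (a : String) :
    (pvRev SK).getD a [] = ((pvFlat SK).filter (fun t => t.1 == a)).map (fun t => t.2) := by
  rw [pvRev_eq_foldl, PySem.Dict.getD_foldl_modify_append, PySem.Dict.getD_empty]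
  simp

lemma mem_pvRev_getD (SK : PySem.Dict String (List String)) (a s : String) (i : Int) :
    (s, i) ∈ (pvRev SK).getD a [] ↔ (a, s, i) ∈ pvFlat SK := by
  rw [pvRev_getD]
  simp only [List.mem_map, List.mem_filter, beq_iff_eq]
  constructor
  · rintro ⟨⟨a', s', i'⟩, ⟨hm, rfl⟩, h⟩; simp at h; simpa [h] using hm
  · intro h; exact ⟨(a, s, i), ⟨h, rfl⟩, rfl⟩

lemma mem_pvFlat (SK : PySem.Dict String (List String)) (a s : String) (i : Int) :
    (a, s, i) ∈ pvFlat SK ↔ ∃ L, (s, L) ∈ SK.items ∧ (i, a) ∈ PySem.List.enumerate L 0 := by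
  simp only [pvFlat, List.mem_flatMap, List.mem_map]
  constructor
  · rintro ⟨⟨s', L⟩, hp, ⟨i', a'⟩, hq, h⟩
    simp at h
    exact ⟨L, by simpa [← h.2.1] using hp, by simpa [h.1, h.2.2] using hq⟩
  · rintro ⟨L, hL, hq⟩
    exact ⟨(s, L), hL, (i, a), hq, rfl⟩

lemma mem_pvSeq (M : PySem.Dict String String) (SK : PySem.Dict String (List String)) (k c : String) (i : Int) :
    (c, i) ∈ pvSeq M SK k ↔ c ∈ M.keys ∧ SK.contains c = false ∧ (k, i) ∈ (pvRev SK).getD c [] := by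
  simp only [pvSeq, List.mem_flatMap]
  constructor
  · rintro ⟨key, hkey, hm⟩
    split at hm
    · simp at hm
    · next hsk =>
      simp only [List.mem_filterMap] at hm
      rcases hm with ⟨⟨s', i'⟩, hq, hsel⟩
      split at hsel
      · next he => simp at hsel; exact ⟨by rw [← hsel.1]; exact hkey, by rw [← hsel.1]; simpa using hsk, by simp at he; subst he; rw [← hsel.1, ← hsel.2]; exact hq⟩
      · simp at hsel
  · rintro ⟨hc, hsk, hm⟩
    refine ⟨c, hc, ?_⟩
    rw [if_neg (by simp [hsk])]
    simp only [List.mem_filterMap]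
    exact ⟨(k, i), hm, by simp⟩

def pvBest (M : PySem.Dict String String) (SK : PySem.Dict String (List String)) : PySem.Dict String (String × Int) :=
  List.foldl (fun (b : PySem.Dict String (String × Int)) key =>
      if SK.contains key then b
      else
        List.foldl (fun (b : PySem.Dict String (String × Int)) q =>
            if M.contains q.1 then b
            else
              match b.get? q.1 with
              | none => b.insert q.1 (key, q.2)
              | some cur => if q.2 < cur.2 then b.insert q.1 (key, q.2) else b)
          b ((pvRev SK).getD key []))
    PySem.Dict.empty M.keys

lemma pvBest_inner_none (M : PySem.Dict String String) (k : String) (hk : M.contains k = true)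
    (key : String) (l : List (String × Int)) :
    ∀ (b : PySem.Dict String (String × Int)), b.get? k = none →
    (List.foldl (fun (b : PySem.Dict String (String × Int)) q =>
        if M.contains q.1 then b
        else
          match b.get? q.1 with
          | none => b.insert q.1 (key, q.2)
          | some cur => if q.2 < cur.2 then b.insert q.1 (key, q.2) else b)
      b l).get? k = none := by
  induction l with
  | nil => intro b hb; exact hb
  | cons q t ih =>
    intro b hb
    rw [List.foldl_cons]
    refine ih _ ?_
    by_cases hq : M.contains q.1 = true
    · rw [if_pos hq]; exact hb
    · have hne : k ≠ q.1 := fun he => by rw [← he] at hq; exact hq hk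
      rw [if_neg hq]
      cases hg : b.get? q.1 with
      | none =>
        show (b.insert q.1 (key, q.2)).get? k = none
        rw [PySem.Dict.get?_insert_of_ne _ _ hne]; exact hb
      | some cur =>
        show (if q.2 < cur.2 then b.insert q.1 (key, q.2) else b).get? k = none
        split
        · rw [PySem.Dict.get?_insert_of_ne _ _ hne]; exact hb
        · exact hb

lemma pvBest_get_none (M : PySem.Dict String String) (SK : PySem.Dict String (List String)) (k : String)
    (hk : M.contains k = true) : (pvBest M SK).get? k = none := by
  unfold pvBest
  have : ∀ (keys : List String) (b : PySem.Dict String (String × Int)), b.get? k = none →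
      (List.foldl (fun (b : PySem.Dict String (String × Int)) key =>
        if SK.contains key then b
        else
          List.foldl (fun (b : PySem.Dict String (String × Int)) q =>
              if M.contains q.1 then b
              else
                match b.get? q.1 with
                | none => b.insert q.1 (key, q.2)
                | some cur => if q.2 < cur.2 then b.insert q.1 (key, q.2) else b)
            b ((pvRev SK).getD key []))
        b keys).get? k = none := by
    intro keys
    induction keys with
    | nil => intro b hb; exact hb
    | cons key t ih =>
      intro b hb
      rw [List.foldl_cons]
      refine ih _ ?_
      by_cases hky : SK.contains key = true
      · rw [if_pos hky]; exact hb
      · rw [if_neg hky]; exact pvBest_inner_none M k hk key _ b hb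
  exact this M.keys PySem.Dict.empty (PySem.Dict.get?_empty k)

lemma pvBest_inner_get (M : PySem.Dict String String) (k : String) (hk : M.contains k = false)
    (key : String) (l : List (String × Int)) :
    ∀ (b : PySem.Dict String (String × Int)),
    (List.foldl (fun (b : PySem.Dict String (String × Int)) q =>
        if M.contains q.1 then b
        else
          match b.get? q.1 with
          | none => b.insert q.1 (key, q.2)
          | some cur => if q.2 < cur.2 then b.insert q.1 (key, q.2) else b)
      b l).get? k
    = (l.filterMap (fun q => if q.1 = k then some (key, q.2) else none)).foldl pvMinStep (b.get? k) := by
  induction l with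
  | nil => intro b; rfl
  | cons q t ih =>
    intro b
    rw [List.foldl_cons]
    by_cases hqk : q.1 = k
    · rw [List.filterMap_cons_some (b := (key, q.2)) (by rw [if_pos hqk]), List.foldl_cons, ih _]
      congr 1
      have hqM : ¬ (M.contains q.1 = true) := by rw [hqk, hk]; simp
      rw [if_neg hqM]
      have hg' : b.get? q.1 = b.get? k := by rw [hqk]
      cases hg : b.get? q.1 with
      | none =>
        show (b.insert q.1 (key, q.2)).get? k = pvMinStep (b.get? k) (key, q.2)
        rw [← hg', hg, ← hqk, PySem.Dict.get?_insert_self]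
        rfl
      | some cur =>
        show (if q.2 < cur.2 then b.insert q.1 (key, q.2) else b).get? k
            = pvMinStep (b.get? k) (key, q.2)
        rw [← hg', hg]
        show _ = (if q.2 < cur.2 then some (key, q.2) else some cur)
        split
        · rw [← hqk, PySem.Dict.get?_insert_self]
        · rw [← hqk, hg]
    · rw [List.filterMap_cons_none (by rw [if_neg hqk]), ih _]
      congr 1
      by_cases hq : M.contains q.1 = true
      · rw [if_pos hq]
      · rw [if_neg hq]
        cases hg : b.get? q.1 with
        | none =>
          show (b.insert q.1 (key, q.2)).get? k = b.get? k
          exact PySem.Dict.get?_insert_of_ne _ _ (fun he => hqk he.symm)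
        | some cur =>
          show (if q.2 < cur.2 then b.insert q.1 (key, q.2) else b).get? k = b.get? k
          split
          · exact PySem.Dict.get?_insert_of_ne _ _ (fun he => hqk he.symm)
          · rfl

lemma pvBest_get (M : PySem.Dict String String) (SK : PySem.Dict String (List String)) (k : String)
    (hk : M.contains k = false) :
    (pvBest M SK).get? k = (pvSeq M SK k).foldl pvMinStep none := by
  unfold pvBest pvSeq
  have : ∀ (keys : List String) (b : PySem.Dict String (String × Int)),
      (List.foldl (fun (b : PySem.Dict String (String × Int)) key =>
        if SK.contains key then b
        else
          List.foldl (fun (b : PySem.Dict String (String × Int)) q =>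
              if M.contains q.1 then b
              else
                match b.get? q.1 with
                | none => b.insert q.1 (key, q.2)
                | some cur => if q.2 < cur.2 then b.insert q.1 (key, q.2) else b)
            b ((pvRev SK).getD key []))
        b keys).get? k
      = (keys.flatMap (fun key =>
          if SK.contains key then []
          else ((pvRev SK).getD key []).filterMap (fun q => if q.1 = k then some (key, q.2) else none))).foldl
          pvMinStep (b.get? k) := by
    intro keys
    induction keys with
    | nil => intro b; rfl
    | cons key t ih =>
      intro b
      rw [List.flatMap_cons, List.foldl_append, List.foldl_cons, ih _]
      congr 1
      by_cases hky : SK.contains key = true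
      · rw [if_pos hky, if_pos hky]
        rfl
      · rw [if_neg hky, if_neg hky]
        exact pvBest_inner_get M k hk key _ b
  rw [this M.keys PySem.Dict.empty, PySem.Dict.get?_empty]

lemma pvBest_fst (M : PySem.Dict String String) (SK : PySem.Dict String (List String))
    (hSK : SK.keys.Nodup) (k : String) (hk : M.contains k = false) (hks : k ∈ SK.keys) :
    ((pvBest M SK).get? k).map Prod.fst
      = (SK.getD k []).find? (fun c => (pvInKeys M SK).contains c) := by
  obtain ⟨L, hL⟩ : ∃ L, SK.get? k = some L := by
    cases hg : SK.get? k with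
    | none => exact absurd ((PySem.Dict.get?_eq_none_iff_not_mem_keys SK k).1 hg) (by simp [hks])
    | some L => exact ⟨L, rfl⟩
  have hgetD : SK.getD k [] = L := by rw [PySem.Dict.getD_eq_get?_getD, hL]; rfl
  have hrevL : ∀ (c : String) (i : Int),
      (k, i) ∈ (pvRev SK).getD c [] ↔ (i, c) ∈ PySem.List.enumerate L 0 := by
    intro c i
    rw [mem_pvRev_getD, mem_pvFlat]
    constructor
    · rintro ⟨L', hL', hm⟩
      have : SK.get? k = some L' := (PySem.Dict.get?_eq_some_iff_mem_items SK k L' hSK).2 hL'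
      rw [hL] at this; injection this with h; rwa [h]
    · intro hm; exact ⟨L, PySem.Dict.mem_items_of_get?_eq_some SK hL, hm⟩
  have hchar : ∀ (c : String) (i : Int),
      (c, i) ∈ pvSeq M SK k ↔ ((pvInKeys M SK).contains c = true ∧
        ∃ j : Nat, L[j]? = some c ∧ i = (j : Int)) := by
    intro c i
    rw [mem_pvSeq, mem_pvInKeys, hrevL, mem_enumerate]
    simp [and_assoc]
  rw [pvBest_get M SK k hk, hgetD]
  cases hf : L.find? (fun c => (pvInKeys M SK).contains c) with
  | none =>
    have hnil : pvSeq M SK k = [] := by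
      rw [List.eq_nil_iff_forall_not_mem]
      rintro ⟨c, i⟩ hm
      rcases (hchar c i).1 hm with ⟨hP, j, hj, -⟩
      have hcL : c ∈ L := List.mem_iff_getElem?.2 ⟨j, hj⟩
      exact (List.find?_eq_none.1 hf c hcL) hP
    rw [hnil]; rfl
  | some c0 =>
    rcases List.find?_eq_some_iff_getElem.1 hf with ⟨hP0, i0, hi0, hL0, hmin⟩
    have hmem0 : (c0, (i0 : Int)) ∈ pvSeq M SK k :=
      (hchar c0 i0).2 ⟨hP0, i0, List.getElem?_eq_some_iff.2 ⟨hi0, hL0⟩, rfl⟩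
    cases hm : (pvSeq M SK k).foldl pvMinStep none with
    | none =>
      rcases (pvMinFold_none _ _).1 hm with ⟨-, hnil⟩
      rw [hnil] at hmem0; simp at hmem0
    | some m =>
      rcases pvMinFold_mem _ _ _ hm with hmm | hco
      · rcases (hchar m.1 m.2).1 (by simpa using hmm) with ⟨hPm, j, hj, hjm⟩
        have hle : m.2 ≤ (i0 : Int) := pvMinFold_le _ _ _ hm (c0, i0) hmem0
        have hjlt : ¬ j < i0 := by
          intro hlt
          have := hmin j hlt
          rcases List.getElem?_eq_some_iff.1 hj with ⟨hjL, hLj⟩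
          rw [hLj, hPm] at this
          simp at this
        have hji : j = i0 := by omega
        have hj0 : L[i0]? = some c0 := List.getElem?_eq_some_iff.2 ⟨hi0, hL0⟩
        subst hji
        rw [hj] at hj0
        simp [Option.some.inj hj0]
      · simp at hco

lemma aLoop_items (SK : PySem.Dict String (List String)) (inks : List String)
    (hinks : ∀ c, inks.contains c = true → SK.contains c = false) :
    ∀ (ks : List String) (d M : PySem.Dict String String), ks.Nodup →
    (∀ k ∈ ks, d.contains k = false) →
    (∀ k ∈ ks, SK.contains k = true) →
    (∀ c, SK.contains c = false → d.getD c "" = M.getD c "") →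
    (List.foldl (fun (d : PySem.Dict String String) std_key =>
        let cand_keys := (SK.getD std_key []).filter (fun c => inks.contains c)
        if cand_keys.length > 0 then d.insert std_key (d.getD (cand_keys.headD "") "") else d)
      d ks).items
    = d.items ++ ks.filterMap (fun k =>
        (((SK.getD k []).filter (fun c => inks.contains c)).head?).map (fun c => (k, M.getD c ""))) := by
  intro ks
  induction ks with
  | nil => intro d M _ _ _ _; simp
  | cons k t ih =>
    intro d M hnd hfresh hkS hstab
    rw [List.foldl_cons, List.filterMap_cons]
    have hkmem : SK.contains k = true := hkS k (List.mem_cons_self)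
    have hknt : k ∉ t := (List.nodup_cons.1 hnd).1
    cases hc : (SK.getD k []).filter (fun c => inks.contains c) with
    | nil =>
      simp only [List.length_nil, gt_iff_lt, lt_irrefl, if_false, List.head?_nil,
        Option.map_none]
      exact ih d M (List.nodup_cons.1 hnd).2 (fun k' h => hfresh k' (List.mem_cons_of_mem _ h))
        (fun k' h => hkS k' (List.mem_cons_of_mem _ h)) hstab
    | cons c rest =>
      have hcin : inks.contains c = true := by
        have : c ∈ (SK.getD k []).filter (fun c => inks.contains c) := by rw [hc]; exact List.mem_cons_self
        exact (List.mem_filter.1 this).2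
      have hcSK : SK.contains c = false := hinks c hcin
      have hdk : d.contains k = false := hfresh k List.mem_cons_self
      simp only [List.length_cons, List.headD_cons, List.head?_cons, Option.map_some]
      rw [if_pos (Nat.succ_pos _)]
      rw [ih (d.insert k (d.getD c "")) M (List.nodup_cons.1 hnd).2
        (fun k' h => by
          rw [PySem.Dict.contains_insert]
          have : k' ≠ k := fun he => hknt (he ▸ h)
          simp [this, hfresh k' (List.mem_cons_of_mem _ h)])
        (fun k' h => hkS k' (List.mem_cons_of_mem _ h))
        (fun c' hc' => by
          have : c' ≠ k := fun he => by rw [he, hkmem] at hc'; exact Bool.true_eq_false.mp hc'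
          rw [PySem.Dict.getD_insert_of_ne _ _ _ this]; exact hstab c' hc')]
      rw [PySem.Dict.items_insert_of_not_contains _ _ hdk, hstab c hcSK, List.append_assoc]
      rfl

lemma bLoop_items (SK : PySem.Dict String (List String)) (best : PySem.Dict String (String × Int))
    (hbp : ∀ k p, best.get? k = some p → SK.contains p.1 = false) :
    ∀ (ks : List String) (d M : PySem.Dict String String), ks.Nodup →
    (∀ k ∈ ks, ∀ p, best.get? k = some p → d.contains k = false) →
    (∀ k ∈ ks, SK.contains k = true) →
    (∀ c, SK.contains c = false → d.getD c "" = M.getD c "") →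
    (List.foldl (fun (d : PySem.Dict String String) std_key =>
        match best.get? std_key with
        | some p => d.insert std_key (d.getD p.1 "")
        | none => d)
      d ks).items
    = d.items ++ ks.filterMap (fun k => (best.get? k).map (fun p => (k, M.getD p.1 ""))) := by
  intro ks
  induction ks with
  | nil => intro d M _ _ _ _; simp
  | cons k t ih =>
    intro d M hnd hfresh hkS hstab
    rw [List.foldl_cons, List.filterMap_cons]
    have hkmem : SK.contains k = true := hkS k (List.mem_cons_self)
    have hknt : k ∉ t := (List.nodup_cons.1 hnd).1
    cases hb : best.get? k with
    | none =>
      simp only [Option.map_none]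
      exact ih d M (List.nodup_cons.1 hnd).2 (fun k' h => hfresh k' (List.mem_cons_of_mem _ h))
        (fun k' h => hkS k' (List.mem_cons_of_mem _ h)) hstab
    | some p =>
      have hpSK : SK.contains p.1 = false := hbp k p hb
      have hdk : d.contains k = false := hfresh k List.mem_cons_self p hb
      simp only [Option.map_some]
      rw [ih (d.insert k (d.getD p.1 "")) M (List.nodup_cons.1 hnd).2
        (fun k' h p' hp' => by
          rw [PySem.Dict.contains_insert]
          have : k' ≠ k := fun he => hknt (he ▸ h)
          simp [this, hfresh k' (List.mem_cons_of_mem _ h) p' hp'])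
        (fun k' h => hkS k' (List.mem_cons_of_mem _ h))
        (fun c' hc' => by
          have : c' ≠ k := fun he => by rw [he, hkmem] at hc'; exact Bool.true_eq_false.mp hc'
          rw [PySem.Dict.getD_insert_of_ne _ _ _ this]; exact hstab c' hc')]
      rw [PySem.Dict.items_insert_of_not_contains _ _ hdk, hstab p.1 hpSK, List.append_assoc]
      rfl

lemma pvBest_some_facts (M : PySem.Dict String String) (SK : PySem.Dict String (List String))
    (k : String) (p : String × Int) (h : (pvBest M SK).get? k = some p) :
    M.contains k = false ∧ SK.contains p.1 = false := by
  have hk : M.contains k = false := by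
    cases hc : M.contains k
    · rfl
    · rw [pvBest_get_none M SK k hc] at h; simp at h
  refine ⟨hk, ?_⟩
  rw [pvBest_get M SK k hk] at h
  rcases pvMinFold_mem _ _ _ h with hm | hm
  · rcases (mem_pvSeq M SK k p.1 p.2).1 (by simpa using hm) with ⟨-, hsk, -⟩
    exact hsk
  · simp at hm

theorem ports_agree (in_meta : List (String × String)) (standard_keys : List (String × List String)) :
    standardize_metadata in_meta standard_keys = standardize_metadata_alt in_meta standard_keys := by
  have hMd : (List.foldl (fun (d : PySem.Dict String String) p => d.insert p.1 p.2) PySem.Dict.empty in_meta)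
      = PySem.Dict.ofList in_meta := rfl
  set M : PySem.Dict String String := PySem.Dict.ofList in_meta with hM
  set SK : PySem.Dict String (List String) := PySem.Dict.ofList standard_keys with hSKdef
  have hSKnd : SK.keys.Nodup := PySem.Dict.nodup_keys_ofList standard_keys
  have hMnd : M.keys.Nodup := PySem.Dict.nodup_keys_ofList in_meta
  have hbestdef : (List.foldl (fun (b : PySem.Dict String (String × Int)) key =>
        if SK.contains key then b
        else
          List.foldl (fun (b : PySem.Dict String (String × Int)) q =>
              if M.contains q.1 then b
              else
                match b.get? q.1 with
                | none => b.insert q.1 (key, q.2)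
                | some cur => if q.2 < cur.2 then b.insert q.1 (key, q.2) else b)
            b ((List.foldl (fun (r : PySem.Dict String (List (String × Int))) p =>
                  List.foldl (fun (r : PySem.Dict String (List (String × Int))) q =>
                      r.modify q.2 [] (fun l => l ++ [(p.1, q.1)]))
                    r (PySem.List.enumerate p.2 0))
                PySem.Dict.empty SK.items).getD key []))
      PySem.Dict.empty M.keys) = pvBest M SK := rfl
  rw [show standardize_metadata in_meta standard_keys =
      (List.foldl (fun (d : PySem.Dict String String) std_key =>
        let cand_keys := (SK.getD std_key []).filter (fun c => (pvInKeys M SK).contains c)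
        if cand_keys.length > 0 then d.insert std_key (d.getD (cand_keys.headD "") "") else d)
      M (SK.keys.filter (fun i => !(M.contains i)))).items from rfl]
  rw [show standardize_metadata_alt in_meta standard_keys =
      (List.foldl (fun (d : PySem.Dict String String) std_key =>
        match (pvBest M SK).get? std_key with
        | some p => d.insert std_key (d.getD p.1 "")
        | none => d)
      M SK.keys).items from rfl]
  have hbp : ∀ k p, (pvBest M SK).get? k = some p → SK.contains p.1 = false :=
    fun k p h => (pvBest_some_facts M SK k p h).2
  rw [aLoop_items SK (pvInKeys M SK)
      (fun c hc => ((mem_pvInKeys M SK c).1 hc).2)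
      (SK.keys.filter (fun i => !(M.contains i))) M M
      (hSKnd.filter _)
      (fun k h => by
        have := (List.mem_filter.1 h).2
        simpa using this)
      (fun k h => (PySem.Dict.contains_iff_mem_keys SK k).2 (List.mem_filter.1 h).1)
      (fun c _ => rfl)]
  rw [bLoop_items SK (pvBest M SK) hbp SK.keys M M hSKnd
      (fun k _ p hp => (pvBest_some_facts M SK k p hp).1)
      (fun k h => (PySem.Dict.contains_iff_mem_keys SK k).2 h)
      (fun c _ => rfl)]
  congr 1
  rw [List.filterMap_filter]
  refine List.filterMap_congr ?_
  intro k hkmem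
  cases hMk : M.contains k with
  | true =>
    rw [if_neg (by decide), pvBest_get_none M SK k hMk]
    rfl
  | false =>
    rw [if_pos (by decide), List.head?_filter]
    have hfst := pvBest_fst M SK hSKnd k hMk hkmem
    cases hb : (pvBest M SK).get? k with
    | none => rw [hb] at hfst; simp only [Option.map_none] at hfst; rw [← hfst]; rfl
    | some p =>
      rw [hb] at hfst
      simp only [Option.map_some] at hfst
      rw [← hfst]
      rfl

-- ===== VERDICT (by name: the statement is the Claim_ definition above) =====
theorem standardize_metadata_spec : Claim_equal_standardize_metadata := by
  intro in_meta standard_keys _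
  unfold Spec_standardize_metadata
  exact ports_agree in_meta standard_keys
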